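-- pv_equiv track=rewrite | github.com/dlanaraa/Programmers | 연습문제/[Lv1] 공원 산책/solution.py | solution
-- ===== SOURCE A (Python) =====
-- def find_S(park):
--     for y, row in enumerate(park):
--         for x, ch in enumerate(row):
--             if ch == "S":
--                 return y, x
--
-- def solution(park, routes):
--     H, W = len(park), len(park[0])
--     y, x = find_S(park)
--
--     for route in routes:
--         d, m = route.split()
--         m = int(m)
--
--         if d == "E":
--             nx = x + m
--             if nx < W and "X" not in park[y][x+1:nx+1]:
--                 x = nx
--         elif d == "W":
--             nx = x - m
--             if nx >= 0 and "X" not in park[y][nx:x]: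
--                 x = nx
--         elif d == "S":
--             ny = y + m
--             if ny < H and all(park[k][x] != "X" for k in range(y+1, ny+1)):
--                 y = ny
--         elif d == "N":
--             ny = y - m
--             if ny >= 0 and all(park[k][x] != "X" for k in range(ny, y)):
--                 y = ny
--
--     return [y, x]
-- ===== SOURCE B (Python) =====
-- def find_S(park):
--     for y, row in enumerate(park):
--         for x, ch in enumerate(row):
--             if ch == "S":
--                 return y, x
--
-- def solution(park, routes):
--     H, W = len(park), len(park[0])
--     y, x = find_S(park)
--     delta = {"E": (0, 1), "W": (0, -1), "S": (1, 0), "N": (-1, 0)}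
--
--     for route in routes:
--         d, m = route.split()
--         if d not in delta:
--             continue
--         dy, dx = delta[d]
--         ty, tx = y, x
--         ok = True
--         for _ in range(int(m)):
--             ty += dy
--             tx += dx
--             if not (0 <= ty < H and 0 <= tx < W) or park[ty][tx] == "X":
--                 ok = False
--                 break
--         if ok:
--             y, x = ty, tx
--
--     return [y, x]
-- ===== Notes on version B (the rewrite author's own statement) =====
-- stated objective: alternative
-- what changed: A single direction-delta-dict driven unit-step walk with a per-step bounds-and-obstacle check (all-or-nothing commit) replaces A's four per-direction branches that each test bounds arithmetically and scan a row slice or an index range.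
-- outside the precondition, e.g. on solution(['S.'], ['E -1']): A returns [0, -1], B returns [0, 0]; on solution(['..', 'S'], ['E 1']): A returns [1, 1], B raises IndexError
import Mathlib
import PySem

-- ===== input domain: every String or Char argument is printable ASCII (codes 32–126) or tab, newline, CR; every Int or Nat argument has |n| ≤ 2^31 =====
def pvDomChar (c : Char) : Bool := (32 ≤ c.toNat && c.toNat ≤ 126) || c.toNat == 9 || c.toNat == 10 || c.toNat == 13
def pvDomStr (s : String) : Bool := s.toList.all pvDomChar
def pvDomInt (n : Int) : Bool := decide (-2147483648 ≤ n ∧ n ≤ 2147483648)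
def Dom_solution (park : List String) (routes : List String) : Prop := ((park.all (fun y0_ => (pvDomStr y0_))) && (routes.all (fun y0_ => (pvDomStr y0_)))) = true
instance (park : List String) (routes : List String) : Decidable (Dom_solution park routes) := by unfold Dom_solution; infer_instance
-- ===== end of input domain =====

-- B re-implements the walk: one delta-dict driven cell-by-cell stepping loop replaces A's four
-- per-direction slice/range scans (objective: idiomatic/alternative decomposition, same cost).

-- ===== PORT A =====
-- find_S: nested enumerate scan for the first 'S' (Source B keeps find_S verbatim, so both ports share it)
def findSRow : List Char → Nat → Option Nat
  | [], _ => none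
  | c :: cs, j => if c = 'S' then some j else findSRow cs (j + 1)

def findS : List String → Nat → Option (Int × Int)
  | [], _ => none
  | s :: rest, i =>
    match findSRow s.toList 0 with
    | some j => some ((i : Int), (j : Int))
    | none => findS rest (i + 1)

-- park[y] (the 'none' default is unreachable under Pre_solution: Python would raise IndexError)
def rowA (park : List String) (k : Int) : List Char :=
  match PySem.List.pyGet? park k with
  | some s => s.toList
  | none => []

-- park[k][x] (defaults unreachable under Pre_solution: Python would raise IndexError)
def cellA (park : List String) (k j : Int) : Char :=
  match PySem.List.pyGet? park k with
  | some s => (PySem.List.pyGet? s.toList j).getD 'X'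
  | none => 'X'

def stepA (park : List String) (H W : Int) (st : Int × Int) (route : String) : Int × Int :=
  match PySem.Str.split₀ route with
  | [d, ms] =>
    match PySem.Int.ofStr? ms with
    | some m =>
      let y := st.1
      let x := st.2
      if d = "E" then
        let nx := x + m
        if nx < W ∧ 'X' ∉ PySem.List.slice (rowA park y) (some (x + 1)) (some (nx + 1)) then
          (y, nx) else (y, x)
      else if d = "W" then
        let nx := x - m
        if 0 ≤ nx ∧ 'X' ∉ PySem.List.slice (rowA park y) (some nx) (some x) then
          (y, nx) else (y, x)
      else if d = "S" then
        let ny := y + m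
        if ny < H ∧ (PySem.List.pyRange (y + 1) (ny + 1) 1).all (fun k => cellA park k x != 'X') then
          (ny, x) else (y, x)
      else if d = "N" then
        let ny := y - m
        if 0 ≤ ny ∧ (PySem.List.pyRange ny y 1).all (fun k => cellA park k x != 'X') then
          (ny, x) else (y, x)
      else (y, x)
    | none => st    -- int(m) raises ValueError; unreachable under Pre_solution
  | _ => st         -- 'd, m = route.split()' raises; unreachable under Pre_solution

def solution (park : List String) (routes : List String) : List Int :=
  match park with
  | [] => [0, 0]    -- park[0] raises IndexError; unreachable under Pre_solution
  | p0 :: rest =>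
    let H : Int := ((p0 :: rest : List String).length : Int)
    let W : Int := (p0.toList.length : Int)
    match findS (p0 :: rest) 0 with
    | none => [0, 0]    -- unpacking find_S's None raises TypeError; unreachable under Pre_solution
    | some (y0, x0) =>
      let p := routes.foldl (stepA (p0 :: rest) H W) (y0, x0)
      [p.1, p.2]

-- ===== PORT B =====
def deltaB : PySem.Dict String (Int × Int) :=
  PySem.Dict.ofList [("E", (0, 1)), ("W", (0, -1)), ("S", (1, 0)), ("N", (-1, 0))]

-- park[ty][tx] (defaults unreachable under Pre_solution: Python would raise IndexError)
def cellB (park : List String) (k j : Int) : Char :=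
  match PySem.List.pyGet? park k with
  | some s => (PySem.List.pyGet? s.toList j).getD 'X'
  | none => 'X'

-- the 'for _ in range(int(m))' loop with its break: 'none' = broke out (ok = False)
def walkB (park : List String) (H W dy dx : Int) : Nat → Int → Int → Option (Int × Int)
  | 0, ty, tx => some (ty, tx)
  | n + 1, ty, tx =>
    let ty' := ty + dy
    let tx' := tx + dx
    if (0 ≤ ty' ∧ ty' < H ∧ 0 ≤ tx' ∧ tx' < W) ∧ cellB park ty' tx' ≠ 'X' then
      walkB park H W dy dx n ty' tx'
    else none

def stepB (park : List String) (H W : Int) (st : Int × Int) (route : String) : Int × Int :=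
  match PySem.Str.split₀ route with
  | [d, ms] =>
    match PySem.Dict.get? deltaB d with
    | some (dy, dx) =>
      match PySem.Int.ofStr? ms with
      | some m =>
        match walkB park H W dy dx m.toNat st.1 st.2 with
        | some p => p
        | none => st
      | none => st    -- int(m) raises ValueError; unreachable under Pre_solution
    | none => st      -- d not in delta: continue
  | _ => st           -- 'd, m = route.split()' raises; unreachable under Pre_solution

def solution_alt (park : List String) (routes : List String) : List Int :=
  match park with
  | [] => [0, 0]    -- park[0] raises IndexError; unreachable under Pre_solution
  | p0 :: rest =>
    let H : Int := ((p0 :: rest : List String).length : Int)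
    let W : Int := (p0.toList.length : Int)
    match findS (p0 :: rest) 0 with
    | none => [0, 0]    -- StopIteration; unreachable under Pre_solution
    | some (y0, x0) =>
      let p := routes.foldl (stepB (p0 :: rest) H W) (y0, x0)
      [p.1, p.2]

-- ===== PRECONDITION & SPEC =====
def routeOk (r : String) : Bool :=
  match PySem.Str.split₀ r with
  | [_, ms] =>
    match PySem.Int.ofStr? ms with
    | some m => decide (0 ≤ m)
    | none => false
  | _ => false

-- Pre_solution excludes: the empty park and parks without 'S' (A raises IndexError/TypeError); routes
-- that do not split into exactly a direction word and an int token (A raises ValueError); ragged parks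
-- when there are routes to walk (A can raise IndexError on vertical moves and its slice/bound tests
-- silently misread rows shorter or longer than row 0); and negative move counts, on which A's slice
-- test is vacuously clear so A wanders out of the grid — an artefact of the slice bounds no caller
-- relies on (and which can make A raise on a later route).
def Pre_solution (park : List String) (routes : List String) : Prop :=
  park ≠ [] ∧
  (∃ s ∈ park, 'S' ∈ s.toList) ∧
  (∀ r ∈ routes, routeOk r = true) ∧
  ((∀ s ∈ park, s.toList.length = (park.headD "").toList.length) ∨ routes = [])
instance (park : List String) (routes : List String) : Decidable (Pre_solution park routes) := by
  unfold Pre_solution; infer_instance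

def pvWitness_solution : List String × List String := (["S.", ".X"], ["E 1", "S 1"])

def Spec_solution (park : List String) (routes : List String) (out : List Int) : Prop := out = solution_alt park routes
instance (park : List String) (routes : List String) (out : List Int) : Decidable (Spec_solution park routes out) := by unfold Spec_solution; infer_instance

-- ===== CLAIM (what is proved, stated in full; the proofs are below) =====
def Claim_equal_solution : Prop := ∀ (park : List String) (routes : List String), Dom_solution park routes → Pre_solution park routes → Spec_solution park routes (solution park routes)

-- ===== LEMMAS AND PROOFS =====

theorem cellB_eq_cellA : cellB = cellA := rfl

theorem routeOk_elim {r : String} (h : routeOk r = true) :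
    ∃ d ms m, PySem.Str.split₀ r = [d, ms] ∧ PySem.Int.ofStr? ms = some m ∧ 0 ≤ m := by
  unfold routeOk at h
  rcases hs : PySem.Str.split₀ r with _ | ⟨d, _ | ⟨ms, _ | _⟩⟩ <;> rw [hs] at h
  · simp at h
  · simp at h
  · simp only [] at h
    rcases ho : PySem.Int.ofStr? ms with _ | m <;> rw [ho] at h
    · simp at h
    · exact ⟨d, ms, m, rfl, ho, by simpa using h⟩
  · simp at h

theorem deltaB_get_other {d : String} (h1 : d ≠ "E") (h2 : d ≠ "W") (h3 : d ≠ "S") (h4 : d ≠ "N") :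
    PySem.Dict.get? deltaB d = none := by
  simp [deltaB, PySem.Dict.ofList, PySem.Dict.update, PySem.Dict.empty, PySem.Dict.insert,
    PySem.Dict.get?, Ne.symm h1, Ne.symm h2, Ne.symm h3, Ne.symm h4, beq_iff_eq]

theorem walkB_E (park : List String) (H W : Int) (n : Nat) (y x : Int)
    (hy : 0 ≤ y) (hyH : y < H) (hx : 0 ≤ x) (hxW : x < W) :
    walkB park H W 0 1 n y x =
      if x + n < W ∧ ∀ k : Nat, k < n → cellB park y (x + k + 1) ≠ 'X' then
        some (y, x + n) else none := by
  induction n generalizing x with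
  | zero =>
    rw [walkB, if_pos ⟨by simpa using hxW, fun k hk => absurd hk (Nat.not_lt_zero k)⟩]
    simp
  | succ n ih =>
    rw [walkB]
    simp only [add_zero]
    by_cases hg : (0 ≤ y ∧ y < H ∧ 0 ≤ x + 1 ∧ x + 1 < W) ∧ cellB park y (x + 1) ≠ 'X'
    · rw [if_pos hg, ih (x + 1) (by omega) hg.1.2.2.2]
      have hiff : (x + 1 + (n : Int) < W ∧ ∀ k : Nat, k < n → cellB park y (x + 1 + k + 1) ≠ 'X') ↔
          (x + ((n : Nat) + 1 : Nat) < W ∧ ∀ k : Nat, k < n + 1 → cellB park y (x + k + 1) ≠ 'X') := by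
      -- reindex the path cells by one step
        constructor
        · rintro ⟨h1, h2⟩
          refine ⟨by push_cast; omega, fun k hk => ?_⟩
          rcases k with _ | k'
          · simpa using hg.2
          · have h3 := h2 k' (by omega)
            have e : x + 1 + (k' : Int) + 1 = x + ((k' + 1 : Nat) : Int) + 1 := by push_cast; ring
            rwa [e] at h3
        · rintro ⟨h1, h2⟩
          refine ⟨by push_cast at h1 ⊢; omega, fun k hk => ?_⟩
          have h3 := h2 (k + 1) (by omega)
          have e : x + ((k + 1 : Nat) : Int) + 1 = x + 1 + k + 1 := by push_cast; ring
          rwa [e] at h3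
      rw [if_congr hiff (by rw [show x + 1 + (n : Int) = x + ((n : Nat) + 1 : Nat) from by push_cast; ring]) rfl]
    · rw [if_neg hg, if_neg ?_]
      rintro ⟨h1, h2⟩
      refine hg ⟨⟨hy, hyH, by omega, by push_cast at h1; omega⟩, by simpa using h2 0 (by omega)⟩

theorem walkB_W (park : List String) (H W : Int) (n : Nat) (y x : Int)
    (hy : 0 ≤ y) (hyH : y < H) (hx : 0 ≤ x) (hxW : x < W) :
    walkB park H W 0 (-1) n y x =
      if 0 ≤ x - n ∧ ∀ k : Nat, k < n → cellB park y (x - k - 1) ≠ 'X' then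
        some (y, x - n) else none := by
  induction n generalizing x with
  | zero =>
    rw [walkB, if_pos ⟨by simpa using hx, fun k hk => absurd hk (Nat.not_lt_zero k)⟩]
    simp
  | succ n ih =>
    rw [walkB]
    simp only [add_zero]
    by_cases hg : (0 ≤ y ∧ y < H ∧ 0 ≤ x + -1 ∧ x + -1 < W) ∧ cellB park y (x + -1) ≠ 'X'
    · rw [if_pos hg, ih (x + -1) hg.1.2.2.1 (by omega)]
      have hiff : (0 ≤ x + -1 - (n : Int) ∧ ∀ k : Nat, k < n → cellB park y (x + -1 - k - 1) ≠ 'X') ↔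
          (0 ≤ x - ((n : Nat) + 1 : Nat) ∧ ∀ k : Nat, k < n + 1 → cellB park y (x - k - 1) ≠ 'X') := by
      -- reindex the path cells by one step
        constructor
        · rintro ⟨h1, h2⟩
          refine ⟨by push_cast at h1 ⊢; omega, fun k hk => ?_⟩
          rcases k with _ | k'
          · simpa using hg.2
          · have h3 := h2 k' (by omega)
            have e : x + -1 - (k' : Int) - 1 = x - ((k' + 1 : Nat) : Int) - 1 := by push_cast; ring
            rwa [e] at h3
        · rintro ⟨h1, h2⟩
          refine ⟨by push_cast at h1 ⊢; omega, fun k hk => ?_⟩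
          have h3 := h2 (k + 1) (by omega)
          have e : x - ((k + 1 : Nat) : Int) - 1 = x + -1 - k - 1 := by push_cast; ring
          rwa [e] at h3
      rw [if_congr hiff (by rw [show x + -1 - (n : Int) = x - ((n : Nat) + 1 : Nat) from by push_cast; ring]) rfl]
    · rw [if_neg hg, if_neg ?_]
      rintro ⟨h1, h2⟩
      refine hg ⟨⟨hy, hyH, by push_cast at h1; omega, by omega⟩, by simpa using h2 0 (by omega)⟩

theorem walkB_S (park : List String) (H W : Int) (n : Nat) (y x : Int)
    (hy : 0 ≤ y) (hyH : y < H) (hx : 0 ≤ x) (hxW : x < W) :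
    walkB park H W 1 0 n y x =
      if y + n < H ∧ ∀ k : Nat, k < n → cellB park (y + k + 1) x ≠ 'X' then
        some (y + n, x) else none := by
  induction n generalizing y with
  | zero =>
    rw [walkB, if_pos ⟨by simpa using hyH, fun k hk => absurd hk (Nat.not_lt_zero k)⟩]
    simp
  | succ n ih =>
    rw [walkB]
    simp only [add_zero]
    by_cases hg : (0 ≤ y + 1 ∧ y + 1 < H ∧ 0 ≤ x ∧ x < W) ∧ cellB park (y + 1) x ≠ 'X'
    · rw [if_pos hg, ih (y + 1) (by omega) hg.1.2.1]
      have hiff : (y + 1 + (n : Int) < H ∧ ∀ k : Nat, k < n → cellB park (y + 1 + k + 1) x ≠ 'X') ↔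
          (y + ((n : Nat) + 1 : Nat) < H ∧ ∀ k : Nat, k < n + 1 → cellB park (y + k + 1) x ≠ 'X') := by
      -- reindex the path cells by one step
        constructor
        · rintro ⟨h1, h2⟩
          refine ⟨by push_cast; omega, fun k hk => ?_⟩
          rcases k with _ | k'
          · simpa using hg.2
          · have h3 := h2 k' (by omega)
            have e : y + 1 + (k' : Int) + 1 = y + ((k' + 1 : Nat) : Int) + 1 := by push_cast; ring
            rwa [e] at h3
        · rintro ⟨h1, h2⟩
          refine ⟨by push_cast at h1 ⊢; omega, fun k hk => ?_⟩
          have h3 := h2 (k + 1) (by omega)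
          have e : y + ((k + 1 : Nat) : Int) + 1 = y + 1 + k + 1 := by push_cast; ring
          rwa [e] at h3
      rw [if_congr hiff (by rw [show y + 1 + (n : Int) = y + ((n : Nat) + 1 : Nat) from by push_cast; ring]) rfl]
    · rw [if_neg hg, if_neg ?_]
      rintro ⟨h1, h2⟩
      refine hg ⟨⟨by omega, by push_cast at h1; omega, hx, hxW⟩, by simpa using h2 0 (by omega)⟩

theorem walkB_N (park : List String) (H W : Int) (n : Nat) (y x : Int)
    (hy : 0 ≤ y) (hyH : y < H) (hx : 0 ≤ x) (hxW : x < W) :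
    walkB park H W (-1) 0 n y x =
      if 0 ≤ y - n ∧ ∀ k : Nat, k < n → cellB park (y - k - 1) x ≠ 'X' then
        some (y - n, x) else none := by
  induction n generalizing y with
  | zero =>
    rw [walkB, if_pos ⟨by simpa using hy, fun k hk => absurd hk (Nat.not_lt_zero k)⟩]
    simp
  | succ n ih =>
    rw [walkB]
    simp only [add_zero]
    by_cases hg : (0 ≤ y + -1 ∧ y + -1 < H ∧ 0 ≤ x ∧ x < W) ∧ cellB park (y + -1) x ≠ 'X'
    · rw [if_pos hg, ih (y + -1) hg.1.1 (by omega)]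
      have hiff : (0 ≤ y + -1 - (n : Int) ∧ ∀ k : Nat, k < n → cellB park (y + -1 - k - 1) x ≠ 'X') ↔
          (0 ≤ y - ((n : Nat) + 1 : Nat) ∧ ∀ k : Nat, k < n + 1 → cellB park (y - k - 1) x ≠ 'X') := by
      -- reindex the path cells by one step
        constructor
        · rintro ⟨h1, h2⟩
          refine ⟨by push_cast at h1 ⊢; omega, fun k hk => ?_⟩
          rcases k with _ | k'
          · simpa using hg.2
          · have h3 := h2 k' (by omega)
            have e : y + -1 - (k' : Int) - 1 = y - ((k' + 1 : Nat) : Int) - 1 := by push_cast; ring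
            rwa [e] at h3
        · rintro ⟨h1, h2⟩
          refine ⟨by push_cast at h1 ⊢; omega, fun k hk => ?_⟩
          have h3 := h2 (k + 1) (by omega)
          have e : y - ((k + 1 : Nat) : Int) - 1 = y + -1 - k - 1 := by push_cast; ring
          rwa [e] at h3
      rw [if_congr hiff (by rw [show y + -1 - (n : Int) = y - ((n : Nat) + 1 : Nat) from by push_cast; ring]) rfl]
    · rw [if_neg hg, if_neg ?_]
      rintro ⟨h1, h2⟩
      refine hg ⟨⟨by push_cast at h1; omega, by omega, hx, hxW⟩, by simpa using h2 0 (by omega)⟩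

theorem notMemX_iff (row : List Char) (a n : Nat) :
    'X' ∉ (row.drop a).take n ↔ ∀ i : Nat, i < n → row[a + i]? ≠ some 'X' := by
  rw [List.mem_iff_getElem?]
  push Not
  constructor
  · intro h i hi
    have := h i
    rwa [List.getElem?_take, if_pos hi, List.getElem?_drop] at this
  · intro h i
    rw [List.getElem?_take]
    split_ifs with hi
    · rw [List.getElem?_drop]; exact h i hi
    · simp

theorem stepA_eq (p0 : String) (rest : List String) (r : String) (y x : Int)
    (hrect : ∀ s ∈ p0 :: rest, s.toList.length = p0.toList.length)
    (hok : routeOk r = true)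
    (hy : 0 ≤ y) (hyH : y < (((p0 :: rest : List String)).length : Int))
    (hx : 0 ≤ x) (hxW : x < (p0.toList.length : Int)) :
    stepA (p0 :: rest) (((p0 :: rest : List String)).length : Int) (p0.toList.length : Int) (y, x) r =
      stepB (p0 :: rest) (((p0 :: rest : List String)).length : Int) (p0.toList.length : Int) (y, x) r := by
  obtain ⟨d, ms, m, hs, ho, hm⟩ := routeOk_elim hok
  have hyl : y.toNat < (p0 :: rest).length := by omega
  have hget : PySem.List.pyGet? (p0 :: rest) y = some ((p0 :: rest)[y.toNat]) := by
    rw [PySem.List.pyGet?_of_nonneg _ hy]; exact List.getElem?_eq_getElem hyl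
  have hrow : rowA (p0 :: rest) y = (p0 :: rest)[y.toNat].toList := by
    simp [rowA, hget]
  have hlen : (p0 :: rest)[y.toNat].toList.length = p0.toList.length :=
    hrect _ (List.getElem_mem hyl)
  have hcell : ∀ j : Int, 0 ≤ j →
      cellA (p0 :: rest) y j = ((p0 :: rest)[y.toNat].toList[j.toNat]?).getD 'X' := by
    intro j hj
    simp [cellA, hget, PySem.List.pyGet?_of_nonneg _ hj]
  have hmn : ((m.toNat : Nat) : Int) = m := Int.toNat_of_nonneg hm
  simp only [stepA, stepB, hs, ho]
  by_cases hdE : d = "E"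
  · subst hdE
    rw [if_pos rfl, show PySem.Dict.get? deltaB "E" = some ((0 : Int), (1 : Int)) from by decide]
    dsimp only
    rw [walkB_E _ _ _ _ _ _ hy hyH hx hxW, hmn]
    by_cases hc : x + m < (p0.toList.length : Int)
    · have hiff : 'X' ∉ PySem.List.slice (rowA (p0 :: rest) y) (some (x + 1)) (some (x + m + 1)) ↔
          ∀ k : Nat, k < m.toNat → cellB (p0 :: rest) y (x + k + 1) ≠ 'X' := by
        rw [hrow, PySem.List.slice_toNat _ (by omega) (by omega),
          show (x + m + 1).toNat - (x + 1).toNat = m.toNat from by omega, notMemX_iff]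
        constructor
        · intro h k hk
          have hlt : (x + (k : Int) + 1).toNat < (p0 :: rest)[y.toNat].toList.length := by omega
          have h2 := h k hk
          rw [show (x + 1).toNat + k = (x + (k : Int) + 1).toNat from by omega,
            List.getElem?_eq_getElem hlt] at h2
          rw [cellB_eq_cellA, hcell _ (by omega), List.getElem?_eq_getElem hlt]
          simpa using h2
        · intro h k hk
          have hlt : (x + (k : Int) + 1).toNat < (p0 :: rest)[y.toNat].toList.length := by omega
          have h2 := h k hk
          rw [cellB_eq_cellA, hcell _ (by omega), List.getElem?_eq_getElem hlt] at h2
          rw [show (x + 1).toNat + k = (x + (k : Int) + 1).toNat from by omega,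
            List.getElem?_eq_getElem hlt]
          simpa using h2
      by_cases hAll : ∀ k : Nat, k < m.toNat → cellB (p0 :: rest) y (x + k + 1) ≠ 'X'
      · rw [if_pos ⟨hc, hiff.mpr hAll⟩, if_pos ⟨hc, hAll⟩]
      · rw [if_neg (fun hh => hAll (hiff.mp hh.2)), if_neg (fun hh => hAll hh.2)]
    · rw [if_neg (fun hh => hc hh.1), if_neg (fun hh => hc hh.1)]
  · rw [if_neg hdE]
    by_cases hdW : d = "W"
    · subst hdW
      rw [if_pos rfl, show PySem.Dict.get? deltaB "W" = some ((0 : Int), (-1 : Int)) from by decide]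
      dsimp only
      rw [walkB_W _ _ _ _ _ _ hy hyH hx hxW, hmn]
      by_cases hc : 0 ≤ x - m
      · have hiff : 'X' ∉ PySem.List.slice (rowA (p0 :: rest) y) (some (x - m)) (some x) ↔
            ∀ k : Nat, k < m.toNat → cellB (p0 :: rest) y (x - k - 1) ≠ 'X' := by
          rw [hrow, PySem.List.slice_toNat _ (by omega) (by omega),
            show x.toNat - (x - m).toNat = m.toNat from by omega, notMemX_iff]
          constructor
          · intro h k hk
            have hlt : (x - (k : Int) - 1).toNat < (p0 :: rest)[y.toNat].toList.length := by omega
            have h2 := h (m.toNat - 1 - k) (by omega)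
            rw [show (x - m).toNat + (m.toNat - 1 - k) = (x - (k : Int) - 1).toNat from by omega,
              List.getElem?_eq_getElem hlt] at h2
            rw [cellB_eq_cellA, hcell _ (by omega), List.getElem?_eq_getElem hlt]
            simpa using h2
          · intro h i hi
            have hlt : (x - ((m.toNat - 1 - i : Nat) : Int) - 1).toNat <
                (p0 :: rest)[y.toNat].toList.length := by omega
            have h2 := h (m.toNat - 1 - i) (by omega)
            rw [cellB_eq_cellA, hcell _ (by omega), List.getElem?_eq_getElem hlt] at h2
            rw [show (x - m).toNat + i = (x - ((m.toNat - 1 - i : Nat) : Int) - 1).toNat from by omega,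
              List.getElem?_eq_getElem hlt]
            simpa using h2
        by_cases hAll : ∀ k : Nat, k < m.toNat → cellB (p0 :: rest) y (x - k - 1) ≠ 'X'
        · rw [if_pos ⟨hc, hiff.mpr hAll⟩, if_pos ⟨hc, hAll⟩]
        · rw [if_neg (fun hh => hAll (hiff.mp hh.2)), if_neg (fun hh => hAll hh.2)]
      · rw [if_neg (fun hh => hc hh.1), if_neg (fun hh => hc hh.1)]
    · rw [if_neg hdW]
      by_cases hdS : d = "S"
      · subst hdS
        rw [if_pos rfl, show PySem.Dict.get? deltaB "S" = some ((1 : Int), (0 : Int)) from by decide]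
        dsimp only
        rw [walkB_S _ _ _ _ _ _ hy hyH hx hxW, hmn]
        have hiff : (PySem.List.pyRange (y + 1) (y + m + 1) 1).all
              (fun k => cellA (p0 :: rest) k x != 'X') = true ↔
            ∀ k : Nat, k < m.toNat → cellB (p0 :: rest) (y + k + 1) x ≠ 'X' := by
          rw [List.all_eq_true]
          constructor
          · intro h k hk
            have h2 := h (y + (k : Int) + 1) (PySem.List.mem_pyRange_one.mpr ⟨by omega, by omega⟩)
            rw [cellB_eq_cellA]
            simpa using h2
          · intro h t ht
            obtain ⟨ht1, ht2⟩ := PySem.List.mem_pyRange_one.mp ht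
            have h3 := h (t - (y + 1)).toNat (by omega)
            rw [show y + (((t - (y + 1)).toNat : Nat) : Int) + 1 = t from by omega,
              cellB_eq_cellA] at h3
            simpa using h3
        by_cases hc : y + m < ((p0 :: rest : List String).length : Int)
        · by_cases hAll : ∀ k : Nat, k < m.toNat → cellB (p0 :: rest) (y + k + 1) x ≠ 'X'
          · rw [if_pos ⟨hc, hiff.mpr hAll⟩, if_pos ⟨hc, hAll⟩]
          · rw [if_neg (fun hh => hAll (hiff.mp hh.2)), if_neg (fun hh => hAll hh.2)]
        · rw [if_neg (fun hh => hc hh.1), if_neg (fun hh => hc hh.1)]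
      · rw [if_neg hdS]
        by_cases hdN : d = "N"
        · subst hdN
          rw [if_pos rfl, show PySem.Dict.get? deltaB "N" = some ((-1 : Int), (0 : Int)) from by decide]
          dsimp only
          rw [walkB_N _ _ _ _ _ _ hy hyH hx hxW, hmn]
          have hiff : (PySem.List.pyRange (y - m) y 1).all
                (fun k => cellA (p0 :: rest) k x != 'X') = true ↔
              ∀ k : Nat, k < m.toNat → cellB (p0 :: rest) (y - k - 1) x ≠ 'X' := by
            rw [List.all_eq_true]
            constructor
            · intro h k hk
              have h2 := h (y - (k : Int) - 1) (PySem.List.mem_pyRange_one.mpr ⟨by omega, by omega⟩)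
              rw [cellB_eq_cellA]
              simpa using h2
            · intro h t ht
              obtain ⟨ht1, ht2⟩ := PySem.List.mem_pyRange_one.mp ht
              have h3 := h (y - 1 - t).toNat (by omega)
              rw [show y - (((y - 1 - t).toNat : Nat) : Int) - 1 = t from by omega,
                cellB_eq_cellA] at h3
              simpa using h3
          by_cases hc : 0 ≤ y - m
          · by_cases hAll : ∀ k : Nat, k < m.toNat → cellB (p0 :: rest) (y - k - 1) x ≠ 'X'
            · rw [if_pos ⟨hc, hiff.mpr hAll⟩, if_pos ⟨hc, hAll⟩]
            · rw [if_neg (fun hh => hAll (hiff.mp hh.2)), if_neg (fun hh => hAll hh.2)]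
          · rw [if_neg (fun hh => hc hh.1), if_neg (fun hh => hc hh.1)]
        · rw [if_neg hdN, deltaB_get_other hdE hdW hdS hdN]

theorem stepA_inv (p0 : String) (rest : List String) (r : String) (y x : Int)
    (hok : routeOk r = true)
    (hy : 0 ≤ y) (hyH : y < (((p0 :: rest : List String)).length : Int))
    (hx : 0 ≤ x) (hxW : x < (p0.toList.length : Int)) :
    0 ≤ (stepA (p0 :: rest) ((p0 :: rest : List String).length : Int) (p0.toList.length : Int) (y, x) r).1 ∧
    (stepA (p0 :: rest) ((p0 :: rest : List String).length : Int) (p0.toList.length : Int) (y, x) r).1 < ((p0 :: rest : List String).length : Int) ∧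
    0 ≤ (stepA (p0 :: rest) ((p0 :: rest : List String).length : Int) (p0.toList.length : Int) (y, x) r).2 ∧
    (stepA (p0 :: rest) ((p0 :: rest : List String).length : Int) (p0.toList.length : Int) (y, x) r).2 < (p0.toList.length : Int) := by
  obtain ⟨d, ms, m, hs, ho, hm⟩ := routeOk_elim hok
  simp only [stepA, hs, ho]
  split_ifs with h1 h2 h3 h4 h5 h6 h7 h8 <;> dsimp only <;>
    refine ⟨by omega, by omega, by omega, by omega⟩

theorem foldl_eq (p0 : String) (rest : List String)
    (hrect : ∀ s ∈ p0 :: rest, s.toList.length = p0.toList.length) :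
    ∀ (routes : List String) (st : Int × Int),
      (∀ r ∈ routes, routeOk r = true) →
      0 ≤ st.1 → st.1 < ((p0 :: rest : List String).length : Int) →
      0 ≤ st.2 → st.2 < (p0.toList.length : Int) →
      routes.foldl (stepA (p0 :: rest) ((p0 :: rest : List String).length : Int) (p0.toList.length : Int)) st =
      routes.foldl (stepB (p0 :: rest) ((p0 :: rest : List String).length : Int) (p0.toList.length : Int)) st := by
  intro routes
  induction routes with
  | nil => intro st _ _ _ _ _; rfl
  | cons r rs ih =>
    rintro ⟨y, x⟩ hro hy hyH hx hxW
    simp only [List.foldl_cons]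
    rw [← stepA_eq p0 rest r y x hrect (hro r (List.mem_cons_self)) hy hyH hx hxW]
    obtain ⟨h1, h2, h3, h4⟩ := stepA_inv p0 rest r y x (hro r (List.mem_cons_self)) hy hyH hx hxW
    exact ih _ (fun t ht => hro t (List.mem_cons_of_mem r ht)) h1 h2 h3 h4

theorem findSRow_bound : ∀ (cs : List Char) (j0 j : Nat), findSRow cs j0 = some j →
    j0 ≤ j ∧ j - j0 < cs.length := by
  intro cs
  induction cs with
  | nil => intro j0 j h; simp [findSRow] at h
  | cons c cs ih =>
    intro j0 j h
    rw [findSRow] at h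
    split_ifs at h with hc
    · cases h; simp
    · have := ih (j0 + 1) j h
      simp only [List.length_cons]
      omega

theorem findSRow_isSome : ∀ (cs : List Char), 'S' ∈ cs → ∀ j0, (findSRow cs j0).isSome = true := by
  intro cs
  induction cs with
  | nil => intro hmem; simp at hmem
  | cons c cs ih =>
    intro hmem j0
    rw [findSRow]
    split_ifs with hc
    · rfl
    · rcases List.mem_cons.mp hmem with h | h
      · exact absurd h.symm hc
      · exact ih h (j0 + 1)

theorem findS_bound : ∀ (l : List String) (i0 : Nat) (y x : Int), findS l i0 = some (y, x) →
    ∃ k : Nat, k < l.length ∧ y = (i0 : Int) + k ∧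
      ∃ s, l[k]? = some s ∧ ∃ j : Nat, x = (j : Int) ∧ j < s.toList.length := by
  intro l
  induction l with
  | nil => intro i0 y x h; simp [findS] at h
  | cons s rest ih =>
    intro i0 y x h
    rw [findS] at h
    rcases hr : findSRow s.toList 0 with _ | j <;> rw [hr] at h
    · obtain ⟨k, hk, hyk, t, ht, j, hj1, hj2⟩ := ih (i0 + 1) y x h
      refine ⟨k + 1, by simpa using hk, by push_cast at hyk ⊢; omega, t, by simpa using ht, j, hj1, hj2⟩
    · cases h
      have hb := findSRow_bound s.toList 0 j hr
      exact ⟨0, by simp, by simp, s, rfl, j, rfl, by omega⟩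

theorem findS_isSome : ∀ (l : List String), (∃ s ∈ l, 'S' ∈ s.toList) → ∀ i0 : Nat,
    (findS l i0).isSome = true := by
  intro l
  induction l with
  | nil => rintro ⟨s, hs, _⟩ _; simp at hs
  | cons t rest ih =>
    rintro ⟨s, hs, hmem⟩ i0
    rw [findS]
    rcases hr : findSRow t.toList 0 with _ | j
    · rcases List.mem_cons.mp hs with h | h
      · subst h
        have := findSRow_isSome s.toList hmem 0
        rw [hr] at this
        simp at this
      · exact ih ⟨s, h, hmem⟩ (i0 + 1)
    · rfl

theorem solution_spec : Claim_equal_solution := by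
  unfold Claim_equal_solution
  intro park routes _ hpre
  obtain ⟨hne, hS, hroutes, hrect'⟩ := hpre
  unfold Spec_solution
  rcases park with _ | ⟨p0, rest⟩
  · exact absurd rfl hne
  simp only [solution, solution_alt]
  rcases hfs : findS (p0 :: rest) 0 with _ | ⟨y0, x0⟩
  · have h := findS_isSome (p0 :: rest) hS 0
    rw [hfs] at h
  · rcases hrect' with hrect | hempty
    · simp only [List.headD_cons] at hrect
      obtain ⟨k, hk, hy0, t, htget, j, hx0, hj⟩ := findS_bound (p0 :: rest) 0 y0 x0 hfs
      have htmem : t ∈ p0 :: rest := List.mem_of_getElem? htget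
      have htlen := hrect t htmem
      dsimp only
      rw [foldl_eq p0 rest hrect routes (y0, x0) hroutes (by omega) (by push_cast; omega)
        (by omega) (by omega)]
    · subst hempty
      rfl
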